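-- pv_equiv track=rewrite | github.com/SeppoPakonen/Maestro | maestro/commands/runbook.py | extract_doc_title_and_summary
-- ===== SOURCE A (Python) =====
-- def extract_doc_title_and_summary(content: str) -> tuple[str, str]:
--     """Extract title and summary from markdown content."""
--     lines = content.split('\n')
--     title = ""
--     summary = ""
--
--     # Look for first heading as title
--     for line in lines:
--         if line.strip().startswith('#'):
--             title = line.strip().lstrip('#').strip()
--             break
--
--     # Look for first paragraph after title as summary
--     in_title_section = True
--     for line in lines:
--         stripped = line.strip()
--         if stripped.startswith('#'):
--             continue
--         if stripped and not stripped.startswith('#'):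
--             summary = stripped
--             break
--
--     return title or "Untitled", summary
-- ===== SOURCE B (Python) =====
-- def extract_doc_title_and_summary(content: str) -> tuple[str, str]:
--     """Extract title and summary from markdown content (single pass with early exit)."""
--     title = None
--     summary = None
--     for line in content.split('\n'):
--         stripped = line.strip()
--         if stripped.startswith('#'):
--             if title is None:
--                 title = stripped.lstrip('#').strip()
--         elif stripped and summary is None:
--             summary = stripped
--         if title is not None and summary is not None:
--             break
--     return title or "Untitled", summary or ""
-- ===== Notes on version B (the rewrite author's own statement) =====
-- stated objective: simpler
-- what changed: B replaces A's two separate sequential scans over the lines (one for the title, one for the summary) by a single pass that maintains both as Option-style slots and breaks early once both are found.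
import Mathlib
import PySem

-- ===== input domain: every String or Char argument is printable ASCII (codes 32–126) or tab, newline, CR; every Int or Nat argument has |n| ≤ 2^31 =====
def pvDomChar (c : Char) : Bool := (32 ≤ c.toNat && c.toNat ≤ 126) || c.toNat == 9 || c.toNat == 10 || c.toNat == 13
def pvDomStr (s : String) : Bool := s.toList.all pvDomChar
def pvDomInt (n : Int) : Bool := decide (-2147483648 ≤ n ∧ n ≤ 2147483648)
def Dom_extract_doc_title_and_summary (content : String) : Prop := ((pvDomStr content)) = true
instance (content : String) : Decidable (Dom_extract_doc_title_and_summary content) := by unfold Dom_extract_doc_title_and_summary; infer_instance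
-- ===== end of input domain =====

-- B merges A's two sequential scans of the lines into one early-exiting pass maintaining both slots; same return value everywhere.

-- ===== PORT A =====
-- exact port of s.lstrip('#'): drop leading '#' characters
def pvLstripHash (s : String) : String := String.ofList (s.toList.dropWhile (fun c => c == '#'))

-- A's first loop: first heading line gives the title, else ""
def pvFindTitleA : List String → String
  | [] => ""
  | line :: rest =>
    if PySem.Str.startswith (PySem.Str.strip line) "#" = true then
      PySem.Str.strip (pvLstripHash (PySem.Str.strip line))
    else pvFindTitleA rest

-- A's second loop: first non-empty non-heading line gives the summary, else ""
def pvFindSummaryA : List String → String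
  | [] => ""
  | line :: rest =>
    let stripped := PySem.Str.strip line
    if PySem.Str.startswith stripped "#" = true then pvFindSummaryA rest
    else if stripped ≠ "" ∧ ¬ (PySem.Str.startswith stripped "#" = true) then stripped
    else pvFindSummaryA rest

def extract_doc_title_and_summary (content : String) : String × String :=
  let lines := (PySem.Str.split? content "\n").getD []  -- "\n" ≠ "" so split? is some
  let title := pvFindTitleA lines
  let summary := pvFindSummaryA lines
  (if title = "" then "Untitled" else title, summary)

-- ===== PORT B =====
-- B's single loop: fill the two slots, break once both are set
def pvLoopB : List String → Option String → Option String → Option String × Option String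
  | [], title, summary => (title, summary)
  | line :: rest, title, summary =>
    let stripped := PySem.Str.strip line
    let st :=
      if PySem.Str.startswith stripped "#" = true then
        (if title.isNone then some (PySem.Str.strip (pvLstripHash stripped)) else title, summary)
      else if stripped ≠ "" ∧ summary.isNone then (title, some stripped)
      else (title, summary)
    if st.1.isSome ∧ st.2.isSome then st else pvLoopB rest st.1 st.2

def extract_doc_title_and_summary_alt (content : String) : String × String :=
  let lines := (PySem.Str.split? content "\n").getD []  -- "\n" ≠ "" so split? is some
  let st := pvLoopB lines none none
  (if st.1.getD "" = "" then "Untitled" else st.1.getD "", st.2.getD "")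

-- ===== PRECONDITION & SPEC =====
def Spec_extract_doc_title_and_summary (content : String) (out : String × String) : Prop := out = extract_doc_title_and_summary_alt content
instance (content : String) (out : String × String) : Decidable (Spec_extract_doc_title_and_summary content out) := by unfold Spec_extract_doc_title_and_summary; infer_instance

-- ===== CLAIM (what is proved, stated in full; the proofs are below) =====
def Claim_equal_extract_doc_title_and_summary : Prop := ∀ (content : String), Dom_extract_doc_title_and_summary content → Spec_extract_doc_title_and_summary content (extract_doc_title_and_summary content)

-- ===== LEMMAS AND PROOFS =====

-- Optional-valued versions of A's two scans, used to state the loop invariant of B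
def pvTitleOpt : List String → Option String
  | [] => none
  | line :: rest =>
    if PySem.Str.startswith (PySem.Str.strip line) "#" = true then
      some (PySem.Str.strip (pvLstripHash (PySem.Str.strip line)))
    else pvTitleOpt rest

def pvSummOpt : List String → Option String
  | [] => none
  | line :: rest =>
    let stripped := PySem.Str.strip line
    if PySem.Str.startswith stripped "#" = true then pvSummOpt rest
    else if stripped ≠ "" ∧ ¬ (PySem.Str.startswith stripped "#" = true) then some stripped
    else pvSummOpt rest

theorem pvFindTitleA_eq (ls : List String) : pvFindTitleA ls = (pvTitleOpt ls).getD "" := by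
  induction ls with
  | nil => rfl
  | cons l rest ih =>
    simp only [pvFindTitleA, pvTitleOpt]
    split_ifs <;> simp [ih]

theorem pvFindSummaryA_eq (ls : List String) : pvFindSummaryA ls = (pvSummOpt ls).getD "" := by
  induction ls with
  | nil => rfl
  | cons l rest ih =>
    simp only [pvFindSummaryA, pvSummOpt]
    split_ifs <;> simp [ih]

theorem pvLoopB_inv (ls : List String) : ∀ (t s : Option String),
    pvLoopB ls t s = (t.orElse (fun _ => pvTitleOpt ls), s.orElse (fun _ => pvSummOpt ls)) := by
  induction ls with
  | nil => intro t s; cases t <;> cases s <;> rfl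
  | cons l rest ih =>
    intro t s
    simp only [pvLoopB, pvTitleOpt, pvSummOpt]
    by_cases hh : PySem.Str.startswith (PySem.Str.strip l) "#" = true
    · simp only [hh, if_pos]
      cases t <;> cases s <;> simp [ih, Option.orElse]
    · simp only [hh]
      by_cases hs : PySem.Str.strip l ≠ ""
      · cases t <;> cases s <;> simp [hs, ih, Option.orElse]
      · cases t <;> cases s <;> simp [hs, ih, Option.orElse]

-- ===== VERDICT (by name: the statement is the Claim_ definition above) =====
theorem extract_doc_title_and_summary_spec : Claim_equal_extract_doc_title_and_summary := by
  intro content _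
  unfold Spec_extract_doc_title_and_summary
  unfold extract_doc_title_and_summary extract_doc_title_and_summary_alt
  simp only [pvLoopB_inv, Option.orElse, pvFindTitleA_eq, pvFindSummaryA_eq]
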